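-- pv_equiv track=rewrite | github.com/ethanJlab/Demystifying-Privacy-Policy-of-TPL-in-Android-Apps | Part2_PrivacyPolicyAnalysis/PP_Analysis_Util.py | locate_noun
-- ===== SOURCE A (Python) =====
-- def locate_noun(lexicon, raw_token):
--     if len(lexicon) > 1:
--         for idx, i in enumerate(lexicon):
--             if raw_token.count(i) == 1:
--                 return raw_token.index(i) + len(lexicon) - idx - 1
--
--         for idx in range(0, len(lexicon) - 1):
--             i = lexicon[idx]
--             for z1 in range(raw_token.index(i), len(raw_token) - len(lexicon)):
--                 if raw_token[z1] == i and raw_token[z1 + 1] == lexicon[idx + 1]: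
--                     return z1 + len(lexicon) - idx - 1
--
--         # for idx, i in enumerate(lexicon):
--         #     for z1 in range(raw_token.index(i), len(raw_token) - len(lexicon)):
--         #         if raw_token[z1] == i and raw_token[z1 + 1] == lexicon[idx + 1]:
--         #             return z1 + len(lexicon) - idx - 1
--     else:
--         if raw_token.count(lexicon[-1]) == 1:
--             return raw_token.index(lexicon[-1])
--
--     # if raw_token.count(lexicon[-1]) == 1:
--     #     return raw_token.index(lexicon[-1])
--     # else:
--     #     tmp = []
--     # for i in lexicon:
--     #     tmp.append(raw_token.index(i))
--     # for i in range(len(tmp) - 1):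
--     #     if tmp[i + 1] - tmp[i] == 1:
--     #         return tmp[i] + len(tmp) - i - 1
--
--     return -1
-- ===== SOURCE B (Python) =====
-- from collections import Counter
--
--
-- def locate_noun(lexicon, raw_token):
--     m = len(lexicon)
--     if m <= 1:
--         tok = lexicon[-1]
--         return raw_token.index(tok) if raw_token.count(tok) == 1 else -1
--     counts = Counter(raw_token)
--     hit = next(((i, t) for i, t in enumerate(lexicon) if counts[t] == 1), None)
--     if hit is not None:
--         i, t = hit
--         return raw_token.index(t) + m - i - 1
--     pair_first = {}
--     for z in range(len(raw_token) - m):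
--         pair_first.setdefault((raw_token[z], raw_token[z + 1]), z)
--     j = next((i for i in range(m - 1)
--               if (lexicon[i], lexicon[i + 1]) in pair_first), None)
--     if j is not None:
--         return pair_first[(lexicon[j], lexicon[j + 1])] + m - j - 1
--     return -1
-- ===== Notes on version B (the rewrite author's own statement) =====
-- stated objective: faster
-- what changed: B replaces A's explicit enumerate/range loops with repeated count/index rescans by a Counter built once plus next() over a generator for phase 1, and a setdefault dict of first adjacent-pair positions queried by next() over the lexicon pairs for phase 2, so every lexicon token/pair is answered by one O(1) lookup.
import Mathlib
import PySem

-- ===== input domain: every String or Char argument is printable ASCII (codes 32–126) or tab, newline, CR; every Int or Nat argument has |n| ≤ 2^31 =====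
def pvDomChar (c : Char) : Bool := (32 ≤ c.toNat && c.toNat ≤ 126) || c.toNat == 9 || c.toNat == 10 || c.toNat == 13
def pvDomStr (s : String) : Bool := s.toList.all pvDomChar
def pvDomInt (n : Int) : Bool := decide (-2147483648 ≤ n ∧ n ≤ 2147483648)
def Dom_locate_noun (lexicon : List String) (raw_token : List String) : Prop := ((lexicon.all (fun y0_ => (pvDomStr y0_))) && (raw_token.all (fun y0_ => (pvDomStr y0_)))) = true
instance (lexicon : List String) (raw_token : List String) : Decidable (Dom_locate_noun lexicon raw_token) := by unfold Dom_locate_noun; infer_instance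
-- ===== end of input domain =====

-- B is an asymptotically faster re-implementation: a Counter built once plus next() over a
-- generator (phase 1) and a setdefault dict of first adjacent-pair positions (phase 2)
-- replace A's nested rescanning loops.

-- ===== PORT A =====
-- first loop of A: 'for idx, i in enumerate(lexicon): if raw_token.count(i) == 1: return …'
def pvA_loop1 (raw_token : List String) (m : Nat) : Nat → List String → Option Int
  | _, [] => none
  | idx, i :: rest =>
    if PySem.List.count raw_token i = 1 then
      some ((((PySem.List.index? raw_token i).getD 0 : Nat) : Int) + (m : Int) - (idx : Int) - 1)
    else pvA_loop1 raw_token m (idx + 1) rest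

-- inner 'for z1 in range(start, stop)' scan of A's second loop
def pvA_scan (raw : List String) (i inext : String) (stop : Nat) (z1 : Nat) : Option Nat :=
  if z1 < stop then
    if raw.getD z1 "" = i ∧ raw.getD (z1 + 1) "" = inext then some z1
    else pvA_scan raw i inext stop (z1 + 1)
  else none
termination_by stop - z1

-- second loop of A: 'for idx in range(0, len(lexicon) - 1): …'
def pvA_loop2 (lexicon raw : List String) (m n : Nat) (idx : Nat) : Option Int :=
  if idx < m - 1 then
    -- i = lexicon[idx]; Python computes raw_token.index(i) here and raises if absent
    -- (excluded by Pre_); the port starts the scan at 0 then, which finds nothing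
    -- whose first component is i.
    match pvA_scan raw (lexicon.getD idx "") (lexicon.getD (idx + 1) "") (n - m)
        ((PySem.List.index? raw (lexicon.getD idx "")).getD 0) with
    | some z1 => some (((z1 : Int) + (m : Int) - (idx : Int) - 1))
    | none => pvA_loop2 lexicon raw m n (idx + 1)
  else none
termination_by m - 1 - idx

def locate_noun (lexicon : List String) (raw_token : List String) : Int :=
  if lexicon.length > 1 then
    match pvA_loop1 raw_token lexicon.length 0 lexicon with
    | some r => r
    | none =>
      match pvA_loop2 lexicon raw_token lexicon.length raw_token.length 0 with
      | some r => r
      | none => -1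
  else
    match PySem.List.pyGet? lexicon (-1) with
    | none => -1   -- Python raises IndexError here (lexicon = []); excluded by Pre_
    | some last =>
      if PySem.List.count raw_token last = 1 then
        (((PySem.List.index? raw_token last).getD 0 : Nat) : Int)
      else -1

-- ===== PORT B =====
-- 'pair_first = {}; for z in range(len(raw_token) - m): pair_first.setdefault((raw_token[z], raw_token[z+1]), z)'
def pvPairFirst (raw : List String) (stop : Nat) : PySem.Dict (String × String) Nat :=
  (List.range stop).foldl
    (fun d z => d.setdefault (raw.getD z "", raw.getD (z + 1) "") z)
    PySem.Dict.empty

def locate_noun_alt (lexicon : List String) (raw_token : List String) : Int :=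
  if lexicon.length ≤ 1 then
    -- tok = lexicon[-1]; return raw_token.index(tok) if raw_token.count(tok) == 1 else -1
    match PySem.List.pyGet? lexicon (-1) with
    | none => -1   -- Python raises IndexError here (lexicon = []); excluded by Pre_
    | some tok =>
      if PySem.List.count raw_token tok = 1 then
        (((PySem.List.index? raw_token tok).getD 0 : Nat) : Int)
      else -1
  else
    -- hit = next(((i, t) for i, t in enumerate(lexicon) if counts[t] == 1), None)
    match (lexicon.zipIdx).find?
        (fun p => (PySem.Dict.counter raw_token).getD p.1 0 == 1) with
    | some (t, i) =>
      (((PySem.List.index? raw_token t).getD 0 : Nat) : Int)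
        + (lexicon.length : Int) - (i : Int) - 1
    | none =>
      -- j = next((i for i in range(m - 1) if (lexicon[i], lexicon[i+1]) in pair_first), None)
      match (List.range (lexicon.length - 1)).find?
          (fun i => (pvPairFirst raw_token (raw_token.length - lexicon.length)).contains
            (lexicon.getD i "", lexicon.getD (i + 1) "")) with
      | some j =>
        (((pvPairFirst raw_token (raw_token.length - lexicon.length)).getD
            (lexicon.getD j "", lexicon.getD (j + 1) "") 0 : Nat) : Int)
          + (lexicon.length : Int) - (j : Int) - 1
      | none => -1

-- ===== PRECONDITION & SPEC =====
-- an adjacent pair of lexicon (at index i) occurs at some position z of raw_token with z + len(lexicon) < len(raw_token)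
def pvPairMatch (lexicon raw_token : List String) (i : Nat) : Prop :=
  ∃ z < raw_token.length, z + lexicon.length < raw_token.length ∧
    raw_token.getD z "" = lexicon.getD i "" ∧ raw_token.getD (z + 1) "" = lexicon.getD (i + 1) ""

-- exactly the inputs where A raises: empty lexicon (IndexError on lexicon[-1]), or, with
-- len(lexicon) > 1 and no token of count 1, a token before the last that is absent from
-- raw_token and no earlier adjacent pair occurs (ValueError from raw_token.index)
def Pre_locate_noun (lexicon : List String) (raw_token : List String) : Prop :=
  lexicon ≠ [] ∧
  ¬ (2 ≤ lexicon.length ∧ (∀ t ∈ lexicon, PySem.List.count raw_token t ≠ 1) ∧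
      ∃ j < lexicon.length - 1, lexicon.getD j "" ∉ raw_token ∧ ∀ i < j, ¬ pvPairMatch lexicon raw_token i)

instance (lexicon : List String) (raw_token : List String) : Decidable (Pre_locate_noun lexicon raw_token) := by
  unfold Pre_locate_noun pvPairMatch; infer_instance

def pvWitness_locate_noun : List String × List String := (["a", "b"], ["a", "x"])

def Spec_locate_noun (lexicon : List String) (raw_token : List String) (out : Int) : Prop := out = locate_noun_alt lexicon raw_token
instance (lexicon : List String) (raw_token : List String) (out : Int) : Decidable (Spec_locate_noun lexicon raw_token out) := by unfold Spec_locate_noun; infer_instance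

-- ===== CLAIM (what is proved, stated in full; the proofs are below) =====
def Claim_equal_locate_noun : Prop := ∀ (lexicon : List String) (raw_token : List String), Dom_locate_noun lexicon raw_token → Pre_locate_noun lexicon raw_token → Spec_locate_noun lexicon raw_token (locate_noun lexicon raw_token)

-- ===== LEMMAS AND PROOFS =====

-- the adjacent pair at position z of raw
def pvPairAt (raw : List String) (z : Nat) : String × String := (raw.getD z "", raw.getD (z + 1) "")

-- A's first loop is the find?-over-enumerate of B
theorem pvA_loop1_eq (raw : List String) (m : Nat) :
    ∀ (idx : Nat) (l : List String),
      pvA_loop1 raw m idx l =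
        ((l.zipIdx idx).find? (fun p => (PySem.Dict.counter raw).getD p.1 0 == 1)).map
          (fun p => (((PySem.List.index? raw p.1).getD 0 : Nat) : Int) + (m : Int) - (p.2 : Int) - 1) := by
  intro idx l
  induction l generalizing idx with
  | nil => rfl
  | cons x t ih =>
    simp only [pvA_loop1, List.zipIdx_cons, List.find?_cons, PySem.Dict.getD_counter,
      PySem.List.count_eq]
    by_cases h : raw.count x = 1
    · have h' : ((raw.count x : Int) == 1) = true := by simpa using (by exact_mod_cast h : (raw.count x : Int) = 1)
      simp [h]
    · have h' : ((raw.count x : Int) == 1) = false := by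
        simp only [beq_eq_false_iff_ne, ne_eq]
        exact_mod_cast h
      simp [h, h', ih]

theorem pvPairFirst_get? (raw : List String) (stop : Nat) (p : String × String) :
    (pvPairFirst raw stop).get? p =
      (List.range stop).find? (fun z => pvPairAt raw z == p) := by
  induction stop with
  | zero => rfl
  | succ k ih =>
    have hstep : pvPairFirst raw (k + 1) = (pvPairFirst raw k).setdefault (pvPairAt raw k) k := by
      unfold pvPairFirst
      rw [List.range_succ, List.foldl_append]
      rfl
    rw [hstep, List.range_succ, List.find?_append]
    by_cases hp : pvPairAt raw k = p
    · subst hp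
      rw [PySem.Dict.get?_setdefault_self, ← ih]
      cases hg : (pvPairFirst raw k).get? (pvPairAt raw k) with
      | none => simp
      | some v => simp
    · rw [PySem.Dict.get?_setdefault_of_ne _ _ (fun h => hp h.symm), ih]
      have h2 : (pvPairAt raw k == p) = false := by simpa using hp
      simp [List.find?, h2]

theorem pvA_scan_eq (raw : List String) (i inext : String) (stop : Nat) :
    ∀ (t : Nat), pvA_scan raw i inext stop t =
      (List.range' t (stop - t)).find? (fun z => pvPairAt raw z == (i, inext)) := by
  intro t
  induction hfu : stop - t generalizing t with
  | zero =>
    have : ¬ t < stop := by omega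
    rw [pvA_scan, if_neg this]
    simp
  | succ k ih =>
    have ht : t < stop := by omega
    rw [pvA_scan, if_pos ht, List.range'_succ]
    by_cases hm : raw.getD t "" = i ∧ raw.getD (t + 1) "" = inext
    · have hb : (fun z => pvPairAt raw z == (i, inext)) t = true := by
        simp only [pvPairAt, beq_iff_eq, Prod.mk.injEq]
        exact ⟨hm.1, hm.2⟩
      rw [if_pos hm]
      exact (List.find?_cons_of_pos (p := fun z => pvPairAt raw z == (i, inext)) hb).symm
    · have hb : ¬ ((fun z => pvPairAt raw z == (i, inext)) t = true) := by
        simp only [pvPairAt, beq_iff_eq, Prod.mk.injEq]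
        exact hm
      rw [if_neg hm, ih (t + 1) (by omega)]
      exact (List.find?_cons_of_neg (p := fun z => pvPairAt raw z == (i, inext)) hb).symm

-- a position strictly below raw.index(i) cannot carry first component i
theorem pvNoEarly (raw : List String) (i : String) :
    ∀ z < (PySem.List.index? raw i).getD 0, raw.getD z "" ≠ i := by
  intro z hz
  cases hidx : PySem.List.index? raw i with
  | none => rw [hidx] at hz; simp at hz
  | some s =>
    rw [hidx] at hz
    simp only [Option.getD_some] at hz
    obtain ⟨hs, _, hall⟩ := PySem.List.getElem_of_index?_eq_some hidx
    have hzlen : z < raw.length := Nat.lt_trans hz hs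
    rw [List.getD_eq_getElem raw "" hzlen]
    exact hall z hz

theorem pvScan_from_start (raw : List String) (i inext : String) (stop : Nat) :
    pvA_scan raw i inext stop ((PySem.List.index? raw i).getD 0) =
      (List.range stop).find? (fun z => pvPairAt raw z == (i, inext)) := by
  set s := (PySem.List.index? raw i).getD 0 with hs
  rw [pvA_scan_eq]
  have hnone : ∀ z ∈ List.range' 0 (min s stop), (fun z => pvPairAt raw z == (i, inext)) z = false := by
    intro z hz
    have hzs : z < s := by
      have := List.mem_range'.mp hz
      omega
    have := pvNoEarly raw i z hzs
    simp only [pvPairAt, Prod.mk.injEq, beq_eq_false_iff_ne, ne_eq]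
    intro hcontra
    exact this hcontra.1
  by_cases hcmp : s ≤ stop
  · have hsplit : List.range stop = List.range' 0 s ++ List.range' s (stop - s) := by
      have h2 := @List.range'_append 0 s (stop - s) 1
      rw [Nat.zero_add, Nat.one_mul, Nat.add_sub_cancel' hcmp] at h2
      rw [List.range_eq_range']
      exact h2.symm
    rw [hsplit, List.find?_append]
    have h0 : (List.range' 0 s).find? (fun z => pvPairAt raw z == (i, inext)) = none := by
      apply List.find?_eq_none.mpr
      intro z hz
      have := hnone z (by simpa [Nat.min_eq_left hcmp] using hz)
      simp [this]
    rw [h0]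
    simp
  · have h1 : stop - s = 0 := by omega
    rw [h1]
    have h0 : (List.range stop).find? (fun z => pvPairAt raw z == (i, inext)) = none := by
      apply List.find?_eq_none.mpr
      intro z hz
      have hz' : z ∈ List.range' 0 (min s stop) := by
        rw [Nat.min_eq_right (by omega)]
        simpa [List.mem_range'] using List.mem_range.mp hz
      have := hnone z hz'
      simp [this]
    simp [h0]

-- A's second loop is B's find?-over-range of the pair-position dict
theorem pvA_loop2_eq (lexicon raw : List String) (m n : Nat) :
    ∀ (idx : Nat), pvA_loop2 lexicon raw m n idx =
      ((List.range' idx (m - 1 - idx)).find? (fun i =>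
          (pvPairFirst raw (n - m)).contains (lexicon.getD i "", lexicon.getD (i + 1) ""))).map
        (fun j => (((pvPairFirst raw (n - m)).getD (lexicon.getD j "", lexicon.getD (j + 1) "") 0 : Nat) : Int)
          + (m : Int) - (j : Int) - 1) := by
  intro idx
  induction hfu : m - 1 - idx generalizing idx with
  | zero =>
    have h : ¬ idx < m - 1 := by omega
    rw [pvA_loop2, if_neg h]
    simp
  | succ k ih =>
    have h : idx < m - 1 := by omega
    rw [pvA_loop2, if_pos h, pvScan_from_start, ← pvPairFirst_get?, List.range'_succ,
      List.find?_cons]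
    cases hg : (pvPairFirst raw (n - m)).get? (lexicon.getD idx "", lexicon.getD (idx + 1) "") with
    | some z =>
      have hc : (pvPairFirst raw (n - m)).contains (lexicon.getD idx "", lexicon.getD (idx + 1) "") = true := by
        rw [PySem.Dict.contains_eq_isSome_get?, hg]; rfl
      have hd : (pvPairFirst raw (n - m)).getD (lexicon.getD idx "", lexicon.getD (idx + 1) "") 0 = z :=
        PySem.Dict.getD_of_get?_eq_some _ 0 hg
      simp only [hc, Option.map_some, hd]
    | none =>
      have hc : (pvPairFirst raw (n - m)).contains (lexicon.getD idx "", lexicon.getD (idx + 1) "") = false := by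
        rw [PySem.Dict.contains_eq_isSome_get?, hg]; rfl
      have hk : m - 1 - (idx + 1) = k := by omega
      simp only [hc]
      rw [ih (idx + 1) hk]

theorem locate_noun_eq_alt (lexicon raw_token : List String) :
    locate_noun lexicon raw_token = locate_noun_alt lexicon raw_token := by
  unfold locate_noun locate_noun_alt
  by_cases h : lexicon.length > 1
  · have h' : ¬ lexicon.length ≤ 1 := by omega
    rw [if_pos h, if_neg h', pvA_loop1_eq]
    have h2 := pvA_loop2_eq lexicon raw_token lexicon.length raw_token.length 0
    rw [Nat.sub_zero, ← List.range_eq_range'] at h2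
    rw [h2]
    cases hf : (lexicon.zipIdx 0).find? (fun p => (PySem.Dict.counter raw_token).getD p.1 0 == 1) with
    | some p =>
      obtain ⟨t, i⟩ := p
      simp
    | none =>
      simp only [Option.map_none]
      cases hg : (List.range (lexicon.length - 1)).find? (fun i =>
          (pvPairFirst raw_token (raw_token.length - lexicon.length)).contains
            (lexicon.getD i "", lexicon.getD (i + 1) "")) with
      | some j => simp
      | none => simp
  · have h' : lexicon.length ≤ 1 := by omega
    rw [if_neg h, if_pos h']

-- ===== VERDICT (by name: the statement is the Claim_ definition above) =====
theorem locate_noun_spec : Claim_equal_locate_noun := by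
  intro lexicon raw_token _ _
  unfold Spec_locate_noun
  exact locate_noun_eq_alt lexicon raw_token
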